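-- pv_equiv track=rewrite | github.com/karidon/HomeWork | web3/web3_dz3.py | reversem
-- ===== SOURCE A (Python) =====
-- def reversem(text):
-- 	'''
-- 	Изменяет порядок следования текст
-- 	- букв в словах;
-- 	- слов в предложениях;
-- 	- предложений в тексте.
-- 	:param text: str
-- 	:return: str
-- 	'''
-- 	a = []
-- 	str = text.strip(' \n\t')
-- 	for i in str.split('.'):
-- 		a.append(i[::-1])
-- 	out = ''
-- 	for j in a[::-1]:
-- 		out += j
-- 	return out
-- ===== SOURCE B (Python) =====
-- def reversem(text):
--     # Concatenating per-segment reversals in reversed segment order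
--     # equals reversing the whole dot-free stripped string.
--     return text.strip(' \n\t').replace('.', '')[::-1]
-- ===== Notes on version B (the rewrite author's own statement) =====
-- stated objective: simpler
-- what changed: Replaces split-on-dot / per-segment reverse / reversed-order concatenation with a single delete-all-dots-then-reverse of the stripped string.
import Mathlib
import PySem

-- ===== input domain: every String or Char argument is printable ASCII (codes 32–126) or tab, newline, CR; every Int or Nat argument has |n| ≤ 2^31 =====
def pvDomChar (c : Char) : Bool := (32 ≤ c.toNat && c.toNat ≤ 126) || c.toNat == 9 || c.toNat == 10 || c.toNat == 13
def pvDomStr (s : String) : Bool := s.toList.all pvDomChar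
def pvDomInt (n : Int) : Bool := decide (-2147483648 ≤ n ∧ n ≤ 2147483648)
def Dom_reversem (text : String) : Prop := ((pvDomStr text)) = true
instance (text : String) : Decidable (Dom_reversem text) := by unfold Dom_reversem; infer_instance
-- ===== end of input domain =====

-- B strips, deletes all dots and reverses the whole string at once (simpler), instead of
-- splitting on dots, reversing each segment and concatenating in reversed segment order.

-- ===== PORT A =====
def reversem (text : String) : String :=
  let s := PySem.Str.stripChars text " \n\t"
  let a := ((PySem.Str.split? s ".").getD []).foldl
      (fun acc i => acc ++ [(PySem.Str.slice? i none none (-1)).getD ""]) []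
  ((PySem.List.slice? a none none (-1)).getD []).foldl (fun out j => out ++ j) ""

-- ===== PORT B =====
def reversem_alt (text : String) : String :=
  (PySem.Str.slice? (PySem.Str.replace (PySem.Str.stripChars text " \n\t") "." "")
      none none (-1)).getD ""

-- ===== PRECONDITION & SPEC =====
def Spec_reversem (text : String) (out : String) : Prop := out = reversem_alt text
instance (text : String) (out : String) : Decidable (Spec_reversem text out) := by unfold Spec_reversem; infer_instance

-- ===== CLAIM (what is proved, stated in full; the proofs are below) =====
def Claim_equal_reversem : Prop := ∀ (text : String), Dom_reversem text → Spec_reversem text (reversem text)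

-- ===== LEMMAS AND PROOFS =====

-- replace.go with old = ['.'], new = [] filters the dots out of the remaining input
lemma replace_go_filter : ∀ (fuel : Nat) (l acc : List Char), l.length ≤ fuel →
    PySem.Chars.replace.go ['.'] [] fuel l acc = acc.reverse ++ l.filter (· != '.') := by
  intro fuel
  induction fuel with
  | zero =>
    intro l acc h
    have : l = [] := List.eq_nil_of_length_eq_zero (Nat.le_zero.mp h)
    subst this
    simp [PySem.Chars.replace.go]
  | succ f ih =>
    intro l acc h
    cases l with
    | nil => simp [PySem.Chars.replace.go]
    | cons c t =>
      rw [PySem.Chars.replace.go]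
      by_cases hc : c = '.'
      · subst hc
        simp [List.isPrefixOf, ih t acc (by simpa using h)]
      · simp [List.isPrefixOf, hc, ih t (c :: acc) (by simpa using h)]
        exact fun h' => absurd h'.symm hc

-- the flatten of splitOn.go's result is the dot-free remaining input
lemma splitOn_go_flatten : ∀ (fuel : Nat) (l cur : List Char) (acc : List (List Char)), l.length ≤ fuel →
    (PySem.Chars.splitOn.go ['.'] fuel l cur acc).flatten
      = acc.reverse.flatten ++ cur.reverse ++ l.filter (· != '.') := by
  intro fuel
  induction fuel with
  | zero =>
    intro l cur acc h
    have : l = [] := List.eq_nil_of_length_eq_zero (Nat.le_zero.mp h)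
    subst this
    simp [PySem.Chars.splitOn.go]
  | succ f ih =>
    intro l cur acc h
    cases l with
    | nil => simp [PySem.Chars.splitOn.go]
    | cons c t =>
      rw [PySem.Chars.splitOn.go]
      by_cases hc : c = '.'
      · subst hc
        simp [List.isPrefixOf, ih t [] (cur.reverse :: acc) (by simpa using h)]
      · have hpre : List.isPrefixOf ['.'] (c :: t) = false := by
          simp [List.isPrefixOf, Ne.symm hc]
        rw [if_neg (by simp [hpre])]
        simp [ih t (c :: cur) acc (by simpa using h), hc]

lemma foldl_append_singleton {α β : Type} (f : α → β) :
    ∀ (L : List α) (acc : List β), L.foldl (fun a i => a ++ [f i]) acc = acc ++ L.map f := by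
  intro L
  induction L with
  | nil => simp
  | cons x xs ih => intro acc; simp [List.foldl, ih]

lemma toList_foldl_append :
    ∀ (L : List String) (acc : String),
      (L.foldl (fun o j => o ++ j) acc).toList = acc.toList ++ (L.map String.toList).flatten := by
  intro L
  induction L with
  | nil => simp
  | cons x xs ih => intro acc; simp [List.foldl, ih]

-- ===== VERDICT (by name: the statement is the Claim_ definition above) =====
theorem reversem_spec : Claim_equal_reversem := by
  intro text _
  unfold Spec_reversem reversem reversem_alt
  set s := PySem.Str.stripChars text " \n\t" with hs
  have hsplit : Option.map (List.map String.toList) (PySem.Str.split? s ".")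
      = some (PySem.Chars.splitOn s.toList ['.']) := by
    rw [PySem.Str.split?_map, PySem.Chars.split?]
    simp
  obtain ⟨L, hL, hLmap⟩ := Option.map_eq_some_iff.mp hsplit
  rw [← String.toList_inj]
  simp only [hL, Option.getD_some, PySem.Str.slice?_none_none_neg_one,
    PySem.List.slice?_none_none_neg_one, foldl_append_singleton, toList_foldl_append]
  have hrep : (PySem.Str.replace s "." "").toList = s.toList.filter (· != '.') := by
    rw [PySem.Str.toList_replace]
    simp [PySem.Chars.replace]
    rw [replace_go_filter s.length s.toList [] (by simp)]
    simp
  have hflat : (PySem.Chars.splitOn s.toList ['.']).flatten = s.toList.filter (· != '.') := by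
    rw [PySem.Chars.splitOn]
    rw [splitOn_go_flatten (s.toList.length + 1) s.toList [] [] (by omega)]
    simp
  simp only [String.toList_empty, List.nil_append, List.map_reverse, List.map_map]
  have : (List.map (String.toList ∘ fun i => String.ofList i.toList.reverse) L)
       = List.map List.reverse (List.map String.toList L) := by
    simp [List.map_map, Function.comp_def]
  rw [this, ← List.reverse_flatten, hLmap, hflat, hrep]
  simp
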